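-- pv_equiv track=rewrite | github.com/Yale-BIDS-Chen-Lab/BioEval | inference-service/src/evaluation/parser.py | process_mcq_option
-- ===== SOURCE A (Python) =====
-- def process_mcq_option(output: str, args) -> str:
--     """
--     Legacy unified MCQ processor - kept for backward compatibility.
--     Use specific functions above for clearer behavior.
--     """
--     if not output or not output.strip():
--         return "missing"
--
--     output = output.lower().strip()
--     option_type = args.get("option_type", "A, B, C, D")  # Default to A, B, C, D
--
--     if option_type == "A, B, C, D, E":
--         # Look for first character a, b, c, d, e
--         return output[0] if output and output[0] in {'a', 'b', 'c', 'd', 'e'} else "missing"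
--     elif option_type == "A, B, C, D":
--         # Look for first character a, b, c, d
--         return output[0] if output and output[0] in {'a', 'b', 'c', 'd'} else "missing"
--     elif option_type == "A, B, C":
--         # Look for first character a, b, c
--         return output[0] if output and output[0] in {'a', 'b', 'c'} else "missing"
--     elif option_type == "Yes, No, Maybe":
--         # Look for substring yes, no, maybe anywhere in text
--         for label in ['yes', 'no', 'maybe']:
--             if label in output:
--                 return label
--         return "missing"
--     elif option_type == "True, False":
--         # Look for substring true, false anywhere in text
--         for label in ['true', 'false']:
--             if label in output:
--                 return label
--         return "missing"
--     elif option_type == "Positive, Negative":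
--         # Look for substring positive, negative anywhere in text
--         for label in ['positive', 'negative']:
--             if label in output:
--                 return label
--         return "missing"
--     else:
--         return "missing"
-- ===== SOURCE B (Python) =====
-- KNOWN_OPTION_TYPES = ("A, B, C, D, E", "A, B, C, D", "A, B, C",
--                       "Yes, No, Maybe", "True, False", "Positive, Negative")
--
--
-- def process_mcq_option(output: str, args) -> str:
--     if not output or not output.strip():
--         return "missing"
--     output = output.lower().strip()
--     option_type = args.get("option_type", "A, B, C, D")
--     if option_type not in KNOWN_OPTION_TYPES:
--         return "missing"
--     # Derive the candidate labels from the option_type string itself.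
--     labels = option_type.lower().split(", ")
--     if all(len(lab) == 1 for lab in labels):
--         # Letter modes: match the first character of the answer.
--         return output[0] if output[0] in labels else "missing"
--     # Word modes: first label occurring anywhere in the answer, in order.
--     for lab in labels:
--         if lab in output:
--             return lab
--     return "missing"
-- ===== Notes on version B (the rewrite author's own statement) =====
-- stated objective: simpler
-- what changed: B is data-driven instead of branch-per-mode: after a single membership check against the six known option_types, it derives the candidate labels by splitting the option_type string itself on ', ', then runs one generic matcher (first-character match when all labels are single letters, otherwise first label that is a substring, in order), so the six hand-written branches disappear.
import Mathlib
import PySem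

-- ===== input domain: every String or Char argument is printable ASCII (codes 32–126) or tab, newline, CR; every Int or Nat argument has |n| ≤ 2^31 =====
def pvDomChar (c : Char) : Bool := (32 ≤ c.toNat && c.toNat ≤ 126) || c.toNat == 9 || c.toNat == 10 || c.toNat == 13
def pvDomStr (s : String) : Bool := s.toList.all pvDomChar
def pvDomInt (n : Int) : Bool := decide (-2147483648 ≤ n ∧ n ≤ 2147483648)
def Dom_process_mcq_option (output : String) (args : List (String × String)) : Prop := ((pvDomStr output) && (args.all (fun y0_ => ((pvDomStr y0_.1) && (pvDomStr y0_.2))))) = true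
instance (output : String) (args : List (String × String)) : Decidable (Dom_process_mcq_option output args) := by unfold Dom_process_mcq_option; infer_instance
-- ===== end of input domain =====

-- B is data-driven instead of branch-per-mode: it parses the option_type string itself into its
-- labels and runs one generic matcher (first-character for single-letter labels, ordered
-- substring search otherwise); same behaviour, simpler decomposition.

-- ===== PORT A =====
def process_mcq_option (output : String) (args : List (String × String)) : String :=
  if output = "" ∨ PySem.Str.strip output = "" then "missing"
  else
    let o := PySem.Str.strip (PySem.Str.lower output)
    let option_type := (PySem.Dict.mk args).getD "option_type" "A, B, C, D"
    if option_type = "A, B, C, D, E" then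
      -- 'output[0] if output and output[0] in {...} else "missing"' (pyGet? none = IndexError)
      match PySem.Str.pyGet? o 0 with
      | some c => if PySem.Set.contains (PySem.Set.ofList ['a','b','c','d','e']) c then String.ofList [c] else "missing"
      | none => "missing"
    else if option_type = "A, B, C, D" then
      match PySem.Str.pyGet? o 0 with
      | some c => if PySem.Set.contains (PySem.Set.ofList ['a','b','c','d']) c then String.ofList [c] else "missing"
      | none => "missing"
    else if option_type = "A, B, C" then
      match PySem.Str.pyGet? o 0 with
      | some c => if PySem.Set.contains (PySem.Set.ofList ['a','b','c']) c then String.ofList [c] else "missing"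
      | none => "missing"
    else if option_type = "Yes, No, Maybe" then
      -- the for-loop over the literal label list, unrolled
      if PySem.Str.isIn "yes" o then "yes"
      else if PySem.Str.isIn "no" o then "no"
      else if PySem.Str.isIn "maybe" o then "maybe"
      else "missing"
    else if option_type = "True, False" then
      if PySem.Str.isIn "true" o then "true"
      else if PySem.Str.isIn "false" o then "false"
      else "missing"
    else if option_type = "Positive, Negative" then
      if PySem.Str.isIn "positive" o then "positive"
      else if PySem.Str.isIn "negative" o then "negative"
      else "missing"
    else "missing"

-- ===== PORT B =====
-- KNOWN_OPTION_TYPES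
def mcqKnown : List String :=
  ["A, B, C, D, E", "A, B, C, D", "A, B, C", "Yes, No, Maybe", "True, False", "Positive, Negative"]

-- 'for lab in labels: if lab in output: return lab / return "missing"'  (labels as char lists)
def mcqFirstSub (o : List Char) : List (List Char) → String
  | [] => "missing"
  | lab :: rest => if PySem.Chars.isIn lab o then String.ofList lab else mcqFirstSub o rest

def process_mcq_option_alt (output : String) (args : List (String × String)) : String :=
  if output = "" ∨ PySem.Str.strip output = "" then "missing"
  else
    let o := PySem.Chars.strip (PySem.Chars.lower output.toList)
    let option_type := (PySem.Dict.mk args).getD "option_type" "A, B, C, D"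
    if mcqKnown.contains option_type then
      -- labels = option_type.lower().split(", ")
      let labels := PySem.Chars.splitOn (PySem.Chars.lower option_type.toList) (", ".toList)
      if labels.all (fun lab => lab.length == 1) then
        -- 'output[0] if output[0] in labels else "missing"'
        match PySem.List.pyGet? o 0 with
        | some c => if labels.contains [c] then String.ofList [c] else "missing"
        | none => "missing"
      else mcqFirstSub o labels
    else "missing"

-- ===== PRECONDITION & SPEC =====
def Spec_process_mcq_option (output : String) (args : List (String × String)) (out : String) : Prop := out = process_mcq_option_alt output args
instance (output : String) (args : List (String × String)) (out : String) : Decidable (Spec_process_mcq_option output args out) := by unfold Spec_process_mcq_option; infer_instance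

-- ===== CLAIM (what is proved, stated in full; the proofs are below) =====
def Claim_equal_process_mcq_option : Prop := ∀ (output : String) (args : List (String × String)), Dom_process_mcq_option output args → Spec_process_mcq_option output args (process_mcq_option output args)

-- ===== LEMMAS AND PROOFS =====
-- ===== VERDICT (by name: the statement is the Claim_ definition above) =====
theorem process_mcq_option_spec : Claim_equal_process_mcq_option := by
  intro output args _
  unfold Spec_process_mcq_option process_mcq_option process_mcq_option_alt
  by_cases h0 : output = "" ∨ PySem.Str.strip output = ""
  · simp only [if_pos h0]
  · simp only [if_neg h0]
    have hoo : PySem.Chars.strip (PySem.Chars.lower output.toList)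
        = (PySem.Str.strip (PySem.Str.lower output)).toList := by simp
    rw [hoo]
    generalize (PySem.Dict.mk args).getD "option_type" "A, B, C, D" = ot
    generalize PySem.Str.strip (PySem.Str.lower output) = o
    by_cases h1 : ot = "A, B, C, D, E"
    · subst h1
      rw [if_pos (show mcqKnown.contains "A, B, C, D, E" = true from by decide),
          show PySem.Chars.splitOn (PySem.Chars.lower "A, B, C, D, E".toList) (", ".toList)
            = (['a','b','c','d','e'].map (fun d => [d])) from by decide]
      rw [if_pos (show ((['a','b','c','d','e'].map (fun d => [d])).all (fun lab => lab.length == 1)) = true from by decide)]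
      simp only [PySem.Str.pyGet?_eq, PySem.Chars.pyGet?_eq_listPyGet?]
      cases PySem.List.pyGet? o.toList 0 with
      | none => rfl
      | some c => simp [PySem.Set.contains, PySem.Set.ofList]
    by_cases h2 : ot = "A, B, C, D"
    · subst h2
      rw [if_neg h1,
          if_pos (show mcqKnown.contains "A, B, C, D" = true from by decide),
          show PySem.Chars.splitOn (PySem.Chars.lower "A, B, C, D".toList) (", ".toList)
            = (['a','b','c','d'].map (fun d => [d])) from by decide]
      rw [if_pos (show ((['a','b','c','d'].map (fun d => [d])).all (fun lab => lab.length == 1)) = true from by decide)]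
      simp only [PySem.Str.pyGet?_eq, PySem.Chars.pyGet?_eq_listPyGet?]
      cases PySem.List.pyGet? o.toList 0 with
      | none => rfl
      | some c => simp [PySem.Set.contains, PySem.Set.ofList]
    by_cases h3 : ot = "A, B, C"
    · subst h3
      rw [if_neg h1, if_neg h2,
          if_pos (show mcqKnown.contains "A, B, C" = true from by decide),
          show PySem.Chars.splitOn (PySem.Chars.lower "A, B, C".toList) (", ".toList)
            = (['a','b','c'].map (fun d => [d])) from by decide]
      rw [if_pos (show ((['a','b','c'].map (fun d => [d])).all (fun lab => lab.length == 1)) = true from by decide)]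
      simp only [PySem.Str.pyGet?_eq, PySem.Chars.pyGet?_eq_listPyGet?]
      cases PySem.List.pyGet? o.toList 0 with
      | none => rfl
      | some c => simp [PySem.Set.contains, PySem.Set.ofList]
    by_cases h4 : ot = "Yes, No, Maybe"
    · subst h4
      rw [if_neg h1, if_neg h2, if_neg h3,
          if_pos (show mcqKnown.contains "Yes, No, Maybe" = true from by decide),
          show PySem.Chars.splitOn (PySem.Chars.lower "Yes, No, Maybe".toList) (", ".toList)
            = ["yes".toList, "no".toList, "maybe".toList] from by decide]
      rw [if_neg (show ¬ ((["yes".toList, "no".toList, "maybe".toList].all (fun lab => lab.length == 1)) = true) from by decide)]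
      simp only [mcqFirstSub, PySem.Str.isIn, if_true]
      rfl
    by_cases h5 : ot = "True, False"
    · subst h5
      rw [if_neg h1, if_neg h2, if_neg h3, if_neg h4,
          if_pos (show mcqKnown.contains "True, False" = true from by decide),
          show PySem.Chars.splitOn (PySem.Chars.lower "True, False".toList) (", ".toList)
            = ["true".toList, "false".toList] from by decide]
      rw [if_neg (show ¬ ((["true".toList, "false".toList].all (fun lab => lab.length == 1)) = true) from by decide)]
      simp only [mcqFirstSub, PySem.Str.isIn, if_true]
      rfl
    by_cases h6 : ot = "Positive, Negative"
    · subst h6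
      rw [if_neg h1, if_neg h2, if_neg h3, if_neg h4, if_neg h5,
          if_pos (show mcqKnown.contains "Positive, Negative" = true from by decide),
          show PySem.Chars.splitOn (PySem.Chars.lower "Positive, Negative".toList) (", ".toList)
            = ["positive".toList, "negative".toList] from by decide]
      rw [if_neg (show ¬ ((["positive".toList, "negative".toList].all (fun lab => lab.length == 1)) = true) from by decide)]
      simp only [mcqFirstSub, PySem.Str.isIn, if_true]
      rfl
    · have hk : mcqKnown.contains ot = false := by
        simp [mcqKnown, h1, h2, h3, h4, h5, h6]
      rw [if_neg h1, if_neg h2, if_neg h3, if_neg h4, if_neg h5, if_neg h6, hk]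
      rfl
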